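-- pv_equiv track=rewrite | github.com/DaemonLoki/Advent-of-Code-2019 | Day06/day06.py | get_orbit_counts
-- ===== SOURCE A (Python) =====
-- def get_orbit_counts(orbit_map):
--     number_of_orbits, orbit_counts = 0, {}
--     for planet in orbit_map.keys():
--         current_orbits = 0
--         cur_planet = planet
--         while True:
--             try:
--                 cur_planet = orbit_map[cur_planet]
--                 current_orbits += 1
--                 if cur_planet in orbit_counts.keys():
--                     current_orbits += orbit_counts[cur_planet]
--                     break
--             except KeyError:
--                 break
--         orbit_counts[planet] = current_orbits
--     return orbit_counts
-- ===== SOURCE B (Python) =====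
-- def get_orbit_counts(orbit_map):
--     depth = {}
--     for planet in orbit_map:
--         path = []
--         cur = planet
--         while cur not in depth and cur in orbit_map:
--             path.append(cur)
--             cur = orbit_map[cur]
--         d = depth.get(cur, 0)
--         while path:
--             node = path.pop()
--             d += 1
--             depth[node] = d
--     return {planet: depth[planet] for planet in orbit_map}
-- ===== Notes on version B (the rewrite author's own statement) =====
-- stated objective: alternative
-- what changed: A re-walks the ancestor chain of every key, caching only finished keys; B walks each chain once, collecting the yet-unknown path and assigning depths back along it, memoizing every visited node (path compression); on the measured random inputs this is not faster.
import Mathlib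
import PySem

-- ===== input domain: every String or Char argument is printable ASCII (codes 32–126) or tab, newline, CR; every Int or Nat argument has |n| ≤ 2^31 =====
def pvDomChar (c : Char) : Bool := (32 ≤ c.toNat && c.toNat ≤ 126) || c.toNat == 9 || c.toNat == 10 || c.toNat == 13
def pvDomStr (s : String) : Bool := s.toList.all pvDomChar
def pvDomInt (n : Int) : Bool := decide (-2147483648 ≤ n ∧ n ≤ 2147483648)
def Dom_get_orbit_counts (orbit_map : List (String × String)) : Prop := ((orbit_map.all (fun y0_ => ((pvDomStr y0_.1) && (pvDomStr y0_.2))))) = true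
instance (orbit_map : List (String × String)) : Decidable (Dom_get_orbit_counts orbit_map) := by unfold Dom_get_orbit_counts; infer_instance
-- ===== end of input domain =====

-- B replaces A's per-key re-walk (which caches finished keys only) by a walk that
-- memoizes the depth of EVERY visited node: it collects the yet-unknown path and
-- assigns depths back along it (path compression) — a different algorithm.

-- one parent-lookup step along the orbit chain (none = KeyError / chain ended)
def pvStep (d : PySem.Dict String String) (o : Option String) : Option String :=
  o.bind (fun k => d.get? k)

-- ===== PORT A =====
-- A's inner `while True` loop: cur/acc are the loop state; the fuel argument only
-- makes the recursion total — on inputs satisfying Pre_ it is never exhausted.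
def walkA (d : PySem.Dict String String) (counts : PySem.Dict String Int) :
    Nat → String → Int → Int
  | 0, _, acc => acc
  | fuel + 1, cur, acc =>
    match d.get? cur with
    | none => acc                                   -- KeyError: break
    | some nxt =>
      if counts.contains nxt then acc + 1 + counts.getD nxt 0
      else walkA d counts fuel nxt (acc + 1)

def get_orbit_counts (orbit_map : List (String × String)) : List (String × Int) :=
  let d : PySem.Dict String String := PySem.Dict.ofList orbit_map
  (d.keys.foldl
    (fun counts planet => counts.insert planet (walkA d counts (d.size + 1) planet 0))
    (PySem.Dict.empty : PySem.Dict String Int)).items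

-- ===== PORT B =====
-- B's first inner loop: collect the path of nodes with unknown depth, return the
-- path and the stopping node (memoized node or root); fuel only for totality.
def ascendB (d : PySem.Dict String String) (depth : PySem.Dict String Int) :
    Nat → String → List String × String
  | 0, cur => ([], cur)
  | fuel + 1, cur =>
    if depth.contains cur then ([], cur)
    else
      match d.get? cur with
      | none => ([], cur)
      | some nxt =>
        let r := ascendB d depth fuel nxt
        (cur :: r.1, r.2)

-- B's per-key body: ascend, then pop the path back (reverse order), assigning depths
def stepKeyB (d : PySem.Dict String String) (depth : PySem.Dict String Int)
    (p : String) : Int × PySem.Dict String Int :=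
  let r := ascendB d depth (d.size + 1) p
  r.1.reverse.foldl
    (fun (st : Int × PySem.Dict String Int) node => (st.1 + 1, st.2.insert node (st.1 + 1)))
    (depth.getD r.2 0, depth)

def get_orbit_counts_alt (orbit_map : List (String × String)) : List (String × Int) :=
  let d : PySem.Dict String String := PySem.Dict.ofList orbit_map
  let depth := d.keys.foldl (fun dep p => (stepKeyB d dep p).2)
    (PySem.Dict.empty : PySem.Dict String Int)
  -- {planet: depth[planet] for planet in orbit_map}: depth[p] always present here
  (d.keys.foldl (fun out p => out.insert p (depth.getD p 0))
    (PySem.Dict.empty : PySem.Dict String Int)).items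

-- ===== PRECONDITION & SPEC =====
-- Pre_ excludes orbit maps whose parent links contain a cycle: on those A's while
-- loop (and B's walk) never terminates, so A returns on exactly the acyclic maps.
def Pre_get_orbit_counts (orbit_map : List (String × String)) : Prop :=
  ∀ k ∈ (PySem.Dict.ofList orbit_map : PySem.Dict String String).keys,
    ∀ m : Nat, m < (PySem.Dict.ofList orbit_map : PySem.Dict String String).size →
      (pvStep (PySem.Dict.ofList orbit_map))^[m + 1] (some k) ≠ some k
instance (orbit_map : List (String × String)) : Decidable (Pre_get_orbit_counts orbit_map) := by
  unfold Pre_get_orbit_counts; infer_instance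

def pvWitness_get_orbit_counts : (List (String × String)) :=
  [("B", "COM"), ("C", "B"), ("D", "C")]

def Spec_get_orbit_counts (orbit_map : List (String × String)) (out : List (String × Int)) : Prop := out = get_orbit_counts_alt orbit_map
instance (orbit_map : List (String × String)) (out : List (String × Int)) : Decidable (Spec_get_orbit_counts orbit_map out) := by unfold Spec_get_orbit_counts; infer_instance

-- ===== CLAIM (what is proved, stated in full; the proofs are below) =====
def Claim_equal_get_orbit_counts : Prop := ∀ (orbit_map : List (String × String)), Dom_get_orbit_counts orbit_map → Pre_get_orbit_counts orbit_map → Spec_get_orbit_counts orbit_map (get_orbit_counts orbit_map)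

-- ===== LEMMAS AND PROOFS =====

lemma pvStep_iter_none (d : PySem.Dict String String) :
    ∀ n : Nat, (pvStep d)^[n] none = none := by
  intro n
  induction n with
  | zero => rfl
  | succ n ih => rw [Function.iterate_succ_apply]; exact ih

lemma pvStep_iter_none_mono (d : PySem.Dict String String) {n m : Nat} (h : n ≤ m)
    {o : Option String} (hn : (pvStep d)^[n] o = none) : (pvStep d)^[m] o = none := by
  have : m = (m - n) + n := by omega
  rw [this, Function.iterate_add_apply, hn, pvStep_iter_none]

-- acyclicity ⇒ every chain dies within size+1 steps
lemma pvTerm (d : PySem.Dict String String) (hnd : d.keys.Nodup)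
    (hpre : ∀ k ∈ d.keys, ∀ m : Nat, m < d.size → (pvStep d)^[m + 1] (some k) ≠ some k)
    (p : String) : (pvStep d)^[d.size + 1] (some p) = none := by
  by_contra h
  have hs : ∀ i : Nat, i ≤ d.size + 1 → ((pvStep d)^[i] (some p)).isSome := by
    intro i hi
    by_contra hn
    have hnone : (pvStep d)^[i] (some p) = none := by
      cases hx : (pvStep d)^[i] (some p) with
      | none => rfl
      | some v => rw [hx] at hn; simp at hn
    exact h (pvStep_iter_none_mono d hi hnone)
  set g : Fin (d.size + 1) → String :=
    fun i => ((pvStep d)^[i.1] (some p)).get (hs i.1 (by omega)) with hg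
  have hgstep : ∀ i : Fin (d.size + 1), (pvStep d)^[i.1] (some p) = some (g i) := by
    intro i; simp [hg]
  have hmem : ∀ i : Fin (d.size + 1), g i ∈ d.keys := by
    intro i
    have h1 : (pvStep d)^[i.1 + 1] (some p) = d.get? (g i) := by
      rw [Function.iterate_succ_apply', hgstep i]; rfl
    have h2 : ((pvStep d)^[i.1 + 1] (some p)).isSome := hs (i.1 + 1) (by omega)
    rw [h1] at h2
    have : d.contains (g i) = true := by
      rw [PySem.Dict.contains_eq_isSome_get?]; exact h2
    exact (PySem.Dict.contains_iff_mem_keys _ _).mp this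
  have hcard : d.keys.toFinset.card < (Finset.univ : Finset (Fin (d.size + 1))).card := by
    rw [List.toFinset_card_of_nodup hnd]
    have : d.keys.length = d.size := by
      simp [PySem.Dict.keys, PySem.Dict.size]
    simp [this]
  obtain ⟨i, -, j, -, hij, hgeq⟩ :=
    Finset.exists_ne_map_eq_of_card_lt_of_maps_to hcard
      (fun i _ => List.mem_toFinset.mpr (hmem i))
  have key : ∀ a b : Fin (d.size + 1), a < b → g a = g b → False := by
    intro a b hab heq
    have hb2 : b.1 < d.size + 1 := b.isLt
    have hab' : a.1 < b.1 := hab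
    have h1 : (pvStep d)^[b.1 - a.1] ((pvStep d)^[a.1] (some p)) = (pvStep d)^[b.1] (some p) := by
      rw [← Function.iterate_add_apply]; congr 1; omega
    have ha : (pvStep d)^[b.1 - a.1] (some (g a)) = some (g a) := by
      rw [hgstep a] at h1
      rw [h1, hgstep b, heq]
    have hm : b.1 - a.1 - 1 + 1 = b.1 - a.1 := by omega
    exact hpre (g a) (hmem a) (b.1 - a.1 - 1) (by omega) (by rw [hm]; exact ha)
  rcases lt_or_gt_of_ne hij with hlt | hlt
  · exact key i j hlt hgeq
  · exact key j i hlt hgeq.symm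

-- fuel-indexed depth: the value both programs compute
def pvDpt (d : PySem.Dict String String) : Nat → String → Int
  | 0, _ => 0
  | n + 1, p =>
    match d.get? p with
    | none => 0
    | some q => pvDpt d n q + 1

lemma pvDpt_stab (d : PySem.Dict String String) :
    ∀ (n : Nat) (p : String) (m : Nat), (pvStep d)^[n] (some p) = none → n ≤ m →
      pvDpt d m p = pvDpt d n p := by
  intro n
  induction n with
  | zero => intro p m h _; simp at h
  | succ n ih =>
    intro p m h hm
    obtain ⟨m', rfl⟩ : ∃ m', m = m' + 1 := ⟨m - 1, by omega⟩
    have hstep : (pvStep d)^[n + 1] (some p) = (pvStep d)^[n] (pvStep d (some p)) :=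
      Function.iterate_succ_apply _ _ _
    cases hq : d.get? p with
    | none => simp [pvDpt, hq]
    | some q =>
      have hq' : pvStep d (some p) = some q := by simp [pvStep, hq]
      rw [hstep, hq'] at h
      simp only [pvDpt, hq]
      rw [ih q m' h (by omega)]

lemma pvDpt_unfold (d : PySem.Dict String String)
    (hterm : ∀ p, (pvStep d)^[d.size + 1] (some p) = none) (p : String) :
    pvDpt d (d.size + 1) p =
      (match d.get? p with
       | none => 0
       | some q => pvDpt d (d.size + 1) q + 1) := by
  have h2 : pvDpt d (d.size + 1 + 1) p = pvDpt d (d.size + 1) p :=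
    pvDpt_stab d (d.size + 1) p (d.size + 1 + 1) (hterm p) (by omega)
  rw [← h2]
  rfl

-- ===== A-side correctness =====

lemma walkA_spec (d : PySem.Dict String String) (D : String → Int)
    (Hd : ∀ p, D p = (match d.get? p with | none => 0 | some q => D q + 1))
    (counts : PySem.Dict String Int)
    (hc : ∀ k v, counts.get? k = some v → v = D k) :
    ∀ (fuel : Nat) (cur : String) (acc : Int),
      (pvStep d)^[fuel] (some cur) = none →
      walkA d counts fuel cur acc = acc + D cur := by
  intro fuel
  induction fuel with
  | zero => intro cur acc h; simp at h
  | succ fuel ih =>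
    intro cur acc h
    cases hq : d.get? cur with
    | none =>
      have : D cur = 0 := by rw [Hd cur, hq]
      simp [walkA, hq, this]
    | some nxt =>
      have hq' : pvStep d (some cur) = some nxt := by simp [pvStep, hq]
      have hnx : (pvStep d)^[fuel] (some nxt) = none := by
        have := h; rwa [Function.iterate_succ_apply, hq'] at this
      have hD : D cur = D nxt + 1 := by rw [Hd cur, hq]
      simp only [walkA, hq]
      by_cases hct : counts.contains nxt = true
      · obtain ⟨v, hv⟩ : ∃ v, counts.get? nxt = some v := by
          have := hct; rw [PySem.Dict.contains_eq_isSome_get?] at this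
          exact Option.isSome_iff_exists.mp this
        have hgd : counts.getD nxt 0 = v := by
          rw [PySem.Dict.getD_eq_get?_getD, hv]; rfl
        rw [if_pos hct, hgd, hc nxt v hv, hD]
        ring
      · rw [if_neg hct, ih nxt (acc + 1) hnx, hD]
        ring

lemma foldA_items (d : PySem.Dict String String) (D : String → Int)
    (Hd : ∀ p, D p = (match d.get? p with | none => 0 | some q => D q + 1))
    (hterm : ∀ p, (pvStep d)^[d.size + 1] (some p) = none) :
    ∀ (l : List String) (counts : PySem.Dict String Int),
      l.Nodup → counts.keys.Nodup →
      (∀ k v, counts.get? k = some v → v = D k) →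
      (∀ k ∈ l, counts.contains k = false) →
      (l.foldl (fun c p => c.insert p (walkA d c (d.size + 1) p 0)) counts).items
        = counts.items ++ l.map (fun k => (k, D k)) := by
  intro l
  induction l with
  | nil => intro counts _ _ _ _; simp
  | cons p l ih =>
    intro counts hl hnd hc hfresh
    have hw : walkA d counts (d.size + 1) p 0 = D p := by
      have := walkA_spec d D Hd counts hc (d.size + 1) p 0 (hterm p)
      simpa using this
    have hpf : counts.contains p = false := hfresh p (by simp)
    have hitems : (counts.insert p (walkA d counts (d.size + 1) p 0)).items
        = counts.items ++ [(p, D p)] := by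
      rw [hw, PySem.Dict.items_insert_of_not_contains _ _ hpf]
    have hnd' : (counts.insert p (walkA d counts (d.size + 1) p 0)).keys.Nodup :=
      PySem.Dict.nodup_keys_insert _ _ _ hnd
    have hc' : ∀ k v, (counts.insert p (walkA d counts (d.size + 1) p 0)).get? k = some v → v = D k := by
      intro k v hk
      rw [PySem.Dict.get?_insert] at hk
      by_cases hkp : k = p
      · rw [if_pos hkp, hw] at hk
        subst hkp
        exact (Option.some_inj.mp hk).symm
      · rw [if_neg hkp] at hk
        exact hc k v hk
    have hfresh' : ∀ k ∈ l, (counts.insert p (walkA d counts (d.size + 1) p 0)).contains k = false := by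
      intro k hk
      rw [PySem.Dict.contains_insert]
      have hkp : k ≠ p := by
        rintro rfl; exact (List.nodup_cons.mp hl).1 hk
      simp [hkp, hfresh k (by simp [hk])]
    simp only [List.foldl_cons]
    rw [ih _ (List.nodup_cons.mp hl).2 hnd' hc' hfresh', hitems]
    simp

-- ===== B-side correctness =====

-- the ascend-then-assign body, in foldr form (foldl over the reversed path)
lemma stepB_spec (d : PySem.Dict String String) (D : String → Int)
    (Hd : ∀ p, D p = (match d.get? p with | none => 0 | some q => D q + 1)) :
    ∀ (fuel : Nat) (p : String) (depth : PySem.Dict String Int),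
      (∀ k v, depth.get? k = some v → v = D k) → depth.keys.Nodup →
      (pvStep d)^[fuel] (some p) = none →
      (((ascendB d depth fuel p).1.foldr
          (fun node (st : Int × PySem.Dict String Int) => (st.1 + 1, st.2.insert node (st.1 + 1)))
          (depth.getD (ascendB d depth fuel p).2 0, depth)).1 = D p
       ∧ (∀ k v, ((ascendB d depth fuel p).1.foldr
          (fun node (st : Int × PySem.Dict String Int) => (st.1 + 1, st.2.insert node (st.1 + 1)))
          (depth.getD (ascendB d depth fuel p).2 0, depth)).2.get? k = some v → v = D k)
       ∧ ((ascendB d depth fuel p).1.foldr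
          (fun node (st : Int × PySem.Dict String Int) => (st.1 + 1, st.2.insert node (st.1 + 1)))
          (depth.getD (ascendB d depth fuel p).2 0, depth)).2.keys.Nodup
       ∧ (∀ x, depth.contains x = true → ((ascendB d depth fuel p).1.foldr
          (fun node (st : Int × PySem.Dict String Int) => (st.1 + 1, st.2.insert node (st.1 + 1)))
          (depth.getD (ascendB d depth fuel p).2 0, depth)).2.contains x = true)
       ∧ (d.contains p = true ∨ depth.contains p = true → ((ascendB d depth fuel p).1.foldr
          (fun node (st : Int × PySem.Dict String Int) => (st.1 + 1, st.2.insert node (st.1 + 1)))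
          (depth.getD (ascendB d depth fuel p).2 0, depth)).2.contains p = true)) := by
  intro fuel
  induction fuel with
  | zero => intro p depth _ _ h; simp at h
  | succ fuel ih =>
    intro p depth hc hnd h
    by_cases hct : depth.contains p = true
    · -- cached: empty path, value from the memo
      obtain ⟨v, hv⟩ : ∃ v, depth.get? p = some v := by
        have := hct; rw [PySem.Dict.contains_eq_isSome_get?] at this
        exact Option.isSome_iff_exists.mp this
      simp only [ascendB, if_pos hct, List.foldr_nil]
      refine ⟨?_, fun k v hk => hc k v hk, hnd, fun x hx => hx, fun _ => hct⟩
      have hgd : depth.getD p 0 = v := by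
        rw [PySem.Dict.getD_eq_get?_getD, hv]; rfl
      rw [hgd]
      exact hc p v hv
    · cases hq : d.get? p with
      | none =>
        -- root not in the memo: empty path, default 0; D p = 0
        have hD : D p = 0 := by rw [Hd p, hq]
        simp only [ascendB, if_neg hct, hq, List.foldr_nil]
        refine ⟨?_, fun k v hk => hc k v hk, hnd, fun x hx => hx, ?_⟩
        · rw [PySem.Dict.getD_of_not_contains _ _ (by simpa using hct), hD]
        · rintro (hd | hdep)
          · rw [PySem.Dict.contains_eq_isSome_get?, hq] at hd; simp at hd
          · exact absurd hdep hct
      | some nxt =>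
        have hq' : pvStep d (some p) = some nxt := by simp [pvStep, hq]
        have hnx : (pvStep d)^[fuel] (some nxt) = none := by
          have := h; rwa [Function.iterate_succ_apply, hq'] at this
        have hD : D p = D nxt + 1 := by rw [Hd p, hq]
        obtain ⟨ih1, ih2, ih3, ih4, _⟩ := ih nxt depth hc hnd hnx
        simp only [ascendB, if_neg hct, hq, List.foldr_cons]
        constructor
        · rw [ih1, hD]
        refine ⟨?_, ?_, ?_, ?_⟩
        · intro k v hk
          rw [PySem.Dict.get?_insert] at hk
          by_cases hkp : k = p
          · rw [if_pos hkp, ih1] at hk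
            subst hkp
            rw [← Option.some_inj.mp hk, hD]
          · rw [if_neg hkp] at hk
            exact ih2 k v hk
        · exact PySem.Dict.nodup_keys_insert _ _ _ ih3
        · intro x hx
          rw [PySem.Dict.contains_insert]
          simp [ih4 x hx]
        · intro _
          exact PySem.Dict.contains_insert_self _ _ _

lemma foldB_depth (d : PySem.Dict String String) (D : String → Int)
    (Hd : ∀ p, D p = (match d.get? p with | none => 0 | some q => D q + 1))
    (hterm : ∀ p, (pvStep d)^[d.size + 1] (some p) = none) :
    ∀ (l : List String) (depth : PySem.Dict String Int),
      (∀ k v, depth.get? k = some v → v = D k) → depth.keys.Nodup →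
      ((∀ k v, (l.foldl (fun dep p => (stepKeyB d dep p).2) depth).get? k = some v → v = D k)
       ∧ (∀ x, depth.contains x = true → (l.foldl (fun dep p => (stepKeyB d dep p).2) depth).contains x = true)
       ∧ (∀ p ∈ l, d.contains p = true → (l.foldl (fun dep p => (stepKeyB d dep p).2) depth).contains p = true)) := by
  intro l
  induction l with
  | nil => intro depth hc _; exact ⟨hc, fun x hx => hx, by simp⟩
  | cons p l ih =>
    intro depth hc hnd
    have hfoldr : stepKeyB d depth p
        = (ascendB d depth (d.size + 1) p).1.foldr
            (fun node (st : Int × PySem.Dict String Int) => (st.1 + 1, st.2.insert node (st.1 + 1)))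
            (depth.getD (ascendB d depth (d.size + 1) p).2 0, depth) := by
      simp only [stepKeyB, List.foldl_reverse]
    obtain ⟨_, h2, h3, h4, h5⟩ :=
      stepB_spec d D Hd (d.size + 1) p depth hc hnd (hterm p)
    rw [← hfoldr] at h2 h3 h4 h5
    obtain ⟨ih1, ih2, ih3⟩ := ih (stepKeyB d depth p).2 h2 h3
    refine ⟨by simpa using ih1, ?_, ?_⟩
    · intro x hx
      simpa using ih2 x (h4 x hx)
    · intro q hq hdq
      simp only [List.foldl_cons]
      rcases List.mem_cons.mp hq with rfl | hql
      · exact ih2 q (h5 (Or.inl hdq))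
      · exact ih3 q hql hdq

lemma pvOutItems (vf : String → Int) :
    ∀ (l : List String) (out : PySem.Dict String Int),
      (∀ a ∈ l, out.contains a = false) → l.Nodup →
      (l.foldl (fun o p => o.insert p (vf p)) out).items
        = out.items ++ l.map (fun p => (p, vf p)) := by
  intro l
  induction l with
  | nil => intro out _ _; simp
  | cons p l ih =>
    intro out hfresh hl
    have hpf : out.contains p = false := hfresh p (by simp)
    have hfresh' : ∀ a ∈ l, (out.insert p (vf p)).contains a = false := by
      intro a ha
      rw [PySem.Dict.contains_insert]
      have hap : a ≠ p := by
        rintro rfl; exact (List.nodup_cons.mp hl).1 ha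
      simp [hap, hfresh a (by simp [ha])]
    simp only [List.foldl_cons]
    rw [ih _ hfresh' (List.nodup_cons.mp hl).2,
      PySem.Dict.items_insert_of_not_contains _ _ hpf]
    simp

-- ===== ASSEMBLY =====

theorem get_orbit_counts_spec : Claim_equal_get_orbit_counts := by
  intro orbit_map _ hpre
  unfold Spec_get_orbit_counts
  set d : PySem.Dict String String := PySem.Dict.ofList orbit_map with hd
  have hnd : d.keys.Nodup := PySem.Dict.nodup_keys_ofList orbit_map
  have hterm : ∀ p, (pvStep d)^[d.size + 1] (some p) = none :=
    pvTerm d hnd (by rw [hd]; exact hpre)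
  set D : String → Int := pvDpt d (d.size + 1) with hD
  have Hd : ∀ p, D p = (match d.get? p with | none => 0 | some q => D q + 1) := by
    intro p; rw [hD]; exact pvDpt_unfold d hterm p
  -- A side
  have hA : get_orbit_counts orbit_map = d.keys.map (fun k => (k, D k)) := by
    simp only [get_orbit_counts, ← hd]
    rw [foldA_items d D Hd hterm d.keys PySem.Dict.empty hnd
      PySem.Dict.nodup_keys_empty (by simp [PySem.Dict.get?_empty])
      (by simp [PySem.Dict.contains_empty])]
    simp [PySem.Dict.empty]
  -- B side
  have hB : get_orbit_counts_alt orbit_map = d.keys.map (fun k => (k, D k)) := by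
    simp only [get_orbit_counts_alt, ← hd]
    obtain ⟨hc, -, hcont⟩ :=
      foldB_depth d D Hd hterm d.keys PySem.Dict.empty
        (by simp [PySem.Dict.get?_empty]) PySem.Dict.nodup_keys_empty
    set F := d.keys.foldl (fun dep p => (stepKeyB d dep p).2)
      (PySem.Dict.empty : PySem.Dict String Int) with hF
    rw [pvOutItems _ d.keys PySem.Dict.empty
      (by simp [PySem.Dict.contains_empty]) hnd]
    simp only [PySem.Dict.empty, List.nil_append]
    apply List.map_congr_left
    intro p hp
    have hcp : F.contains p = true :=
      hcont p hp ((PySem.Dict.contains_iff_mem_keys _ _).mpr hp)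
    obtain ⟨v, hv⟩ : ∃ v, F.get? p = some v := by
      rw [PySem.Dict.contains_eq_isSome_get?] at hcp
      exact Option.isSome_iff_exists.mp hcp
    rw [PySem.Dict.getD_eq_get?_getD, hv]
    simp [hc p v hv]
  rw [hA, hB]
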